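-- pv_equiv track=rewrite | github.com/orangelightening/ExFrame | generic_framework/plugins/exframe/exframe_specialist.py | _form_source_list
-- ===== SOURCE A (Python) =====
-- from typing import List, Dict, Any, Optional
--
-- def _form_source_list(document_results: List, local_results: List) -> str:
--     """Format source list for display at the end of response.
--
--     Args:
--         document_results: Results from research + document store
--         local_results: Results from local pattern search
--
--     Returns:
--         Formatted source list string
--     """
--     if not document_results and not local_results:
--         return ""
--
--     # Format results
--     output = []
--
--     # Add document results (research + document store)
--     for i, result in enumerate(document_results):
--         source = result.get("source", "Document Store")
--         title = result.get("title", result.get("name", "Unknown"))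
--         output.append(f"{i+1}. {source}: {title}")
--
--     # Add local pattern results
--     offset = len(document_results)
--     for i, result in enumerate(local_results):
--         source = "Local Patterns"
--         name = result.get("name", "Unknown")
--         output.append(f"{offset + i + 1}. {source}: {name}")
--
--     return "\n".join(output)
-- ===== SOURCE B (Python) =====
-- def _form_source_list(document_results, local_results) -> str:
--     """Single recursive pass with an explicit running counter; the joined string
--     is assembled while unwinding, so no intermediate list of lines is built."""
--     def go(docs, locs, n):
--         if docs:
--             r = docs[0]
--             title = r.get("title", r.get("name", "Unknown"))
--             line = f"{n}. {r.get('source', 'Document Store')}: {title}"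
--             rest = go(docs[1:], locs, n + 1)
--         elif locs:
--             r = locs[0]
--             line = f"{n}. Local Patterns: {r.get('name', 'Unknown')}"
--             rest = go(docs, locs[1:], n + 1)
--         else:
--             return ""
--         return line if not rest else line + "\n" + rest
--     return go(document_results, local_results, 1)
-- ===== Notes on version B (the rewrite author's own statement) =====
-- stated objective: alternative
-- what changed: B replaces A's two indexed loops that append to an output list followed by a join with one recursive pass over both lists carrying a running counter, concatenating the result string directly while unwinding (no intermediate list, no offset arithmetic, no empty guard).
import Mathlib
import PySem

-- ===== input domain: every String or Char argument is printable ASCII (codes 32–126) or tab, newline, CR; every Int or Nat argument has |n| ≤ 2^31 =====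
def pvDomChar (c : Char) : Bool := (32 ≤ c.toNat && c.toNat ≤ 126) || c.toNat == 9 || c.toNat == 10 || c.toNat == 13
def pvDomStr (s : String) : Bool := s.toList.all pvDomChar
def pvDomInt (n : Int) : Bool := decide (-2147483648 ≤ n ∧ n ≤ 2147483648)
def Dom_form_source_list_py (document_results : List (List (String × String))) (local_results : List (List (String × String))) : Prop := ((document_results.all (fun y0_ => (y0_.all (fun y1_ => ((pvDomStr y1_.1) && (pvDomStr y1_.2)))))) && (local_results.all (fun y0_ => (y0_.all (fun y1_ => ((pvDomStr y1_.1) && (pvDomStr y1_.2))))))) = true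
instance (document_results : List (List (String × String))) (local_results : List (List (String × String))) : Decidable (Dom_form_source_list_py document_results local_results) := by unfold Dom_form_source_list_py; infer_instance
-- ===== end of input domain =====

-- B replaces A's two indexed loops + join by one recursive pass over both lists with a
-- running counter, concatenating the result string directly while unwinding ('alternative').

-- dict.get(k, dflt) on the association-list encoding of a Python dict (first match)
def pvGetD (r : List (String × String)) (k dflt : String) : String :=
  (PySem.Dict.mk r).getD k dflt

-- ===== PORT A =====
def form_source_list_py (document_results : List (List (String × String))) (local_results : List (List (String × String))) : String :=
  if document_results.isEmpty && local_results.isEmpty then ""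
  else
    -- first loop: numbered document results
    let output1 := (PySem.List.enumerate document_results 0).map (fun p =>
      let source := pvGetD p.2 "source" "Document Store"
      let title := pvGetD p.2 "title" (pvGetD p.2 "name" "Unknown")
      PySem.Int.toStr (p.1 + 1) ++ ". " ++ source ++ ": " ++ title)
    -- second loop: local pattern results, numbered from offset
    let offset : Int := document_results.length
    let output2 := (PySem.List.enumerate local_results 0).map (fun p =>
      let name := pvGetD p.2 "name" "Unknown"
      PySem.Int.toStr (offset + p.1 + 1) ++ ". " ++ "Local Patterns" ++ ": " ++ name)
    PySem.Str.join "\n" (output1 ++ output2)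

-- ===== PORT B =====
-- the inner recursive helper 'go' of Source B: one pass, counter n, string built on unwinding
def form_source_list_py_go (docs locs : List (List (String × String))) (n : Int) : String :=
  match docs, locs with
  | r :: dt, _ =>
    let title := pvGetD r "title" (pvGetD r "name" "Unknown")
    let line := PySem.Int.toStr n ++ ". " ++ pvGetD r "source" "Document Store" ++ ": " ++ title
    let rest := form_source_list_py_go dt locs (n + 1)
    if rest == "" then line else line ++ "\n" ++ rest
  | [], r :: lt =>
    let line := PySem.Int.toStr n ++ ". Local Patterns: " ++ pvGetD r "name" "Unknown"
    let rest := form_source_list_py_go [] lt (n + 1)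
    if rest == "" then line else line ++ "\n" ++ rest
  | [], [] => ""

def form_source_list_py_alt (document_results : List (List (String × String))) (local_results : List (List (String × String))) : String :=
  form_source_list_py_go document_results local_results 1

-- ===== PRECONDITION & SPEC =====
def Spec_form_source_list_py (document_results : List (List (String × String))) (local_results : List (List (String × String))) (out : String) : Prop := out = form_source_list_py_alt document_results local_results
instance (document_results : List (List (String × String))) (local_results : List (List (String × String))) (out : String) : Decidable (Spec_form_source_list_py document_results local_results out) := by unfold Spec_form_source_list_py; infer_instance

-- ===== CLAIM =====
def Claim_equal_form_source_list_py : Prop := ∀ (document_results : List (List (String × String))) (local_results : List (List (String × String))), Dom_form_source_list_py document_results local_results → Spec_form_source_list_py document_results local_results (form_source_list_py document_results local_results)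

-- ===== LEMMAS AND PROOFS =====

-- the list of numbered lines, local part
def pvLocLines (n : Int) : List (List (String × String)) → List String
  | [] => []
  | r :: t => (PySem.Int.toStr n ++ ". Local Patterns: " ++ pvGetD r "name" "Unknown") :: pvLocLines (n + 1) t

-- the list of numbered lines, document part followed by local part
def pvAllLines (n : Int) (docs locs : List (List (String × String))) : List String :=
  match docs with
  | [] => pvLocLines n locs
  | r :: t => (PySem.Int.toStr n ++ ". " ++ pvGetD r "source" "Document Store" ++ ": "
      ++ pvGetD r "title" (pvGetD r "name" "Unknown")) :: pvAllLines (n + 1) t locs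

theorem join_nil' : (PySem.Str.join "\n" [] : String) = "" := by
  simp [PySem.Str.join, PySem.Chars.join_nil]

theorem join_cons' (x : String) (l : List String) :
    PySem.Str.join "\n" (x :: l) =
      if l = [] then x else x ++ "\n" ++ PySem.Str.join "\n" l := by
  cases l with
  | nil => simp [PySem.Str.join, PySem.Chars.join_singleton]
  | cons y t =>
    simp only [PySem.Str.join, List.map_cons, PySem.Chars.join_cons_cons,
      String.ofList_append, String.ofList_toList, List.cons_ne_nil, if_false,
      String.append_assoc]

-- every generated line is nonempty (it contains the literal ". ")
theorem line_ne_empty (a m b : String) (hm : m.length ≠ 0) : a ++ m ++ b ≠ "" := by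
  intro h
  have hl := congrArg String.length h
  simp only [String.length_append] at hl
  have : ("" : String).length = 0 := rfl
  omega

theorem mem_allLines_ne_empty (docs locs : List (List (String × String))) (n : Int)
    (s : String) (hs : s ∈ pvAllLines n docs locs) : s ≠ "" := by
  induction docs generalizing n with
  | nil =>
    induction locs generalizing n with
    | nil => simp [pvAllLines, pvLocLines] at hs
    | cons r lt ih =>
      simp only [pvAllLines, pvLocLines, List.mem_cons] at hs ih
      rcases hs with rfl | hs
      · exact line_ne_empty _ ". Local Patterns: " _ (by decide)
      · exact ih (n + 1) hs
  | cons r dt ih =>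
    simp only [pvAllLines, List.mem_cons] at hs
    rcases hs with rfl | hs
    · rw [show (PySem.Int.toStr n ++ ". " ++ pvGetD r "source" "Document Store" ++ ": "
          ++ pvGetD r "title" (pvGetD r "name" "Unknown")) =
          PySem.Int.toStr n ++ ". " ++ (pvGetD r "source" "Document Store" ++ ": "
          ++ pvGetD r "title" (pvGetD r "name" "Unknown")) by
        simp [String.append_assoc]]
      exact line_ne_empty _ ". " _ (by decide)
    · exact ih (n + 1) hs

theorem join_allLines_eq_empty_iff (docs locs : List (List (String × String))) (n : Int) :
    PySem.Str.join "\n" (pvAllLines n docs locs) = "" ↔ pvAllLines n docs locs = [] := by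
  constructor
  · intro h
    cases hE : pvAllLines n docs locs with
    | nil => rfl
    | cons x t =>
      exfalso
      rw [hE, join_cons'] at h
      cases t with
      | nil =>
        exact mem_allLines_ne_empty docs locs n x (hE ▸ List.mem_cons_self) (by simpa using h)
      | cons y u =>
        simp only [List.cons_ne_nil, if_false] at h
        exact line_ne_empty _ "\n" _ (by decide) h
  · intro h; rw [h, join_nil']

-- B's helper computes the join of the numbered lines
theorem go_eq_join (docs locs : List (List (String × String))) (n : Int) :
    form_source_list_py_go docs locs n = PySem.Str.join "\n" (pvAllLines n docs locs) := by
  induction docs generalizing n with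
  | nil =>
    induction locs generalizing n with
    | nil => simp [form_source_list_py_go, pvAllLines, pvLocLines, join_nil']
    | cons r lt ih =>
      rw [show pvAllLines n [] (r :: lt) = (PySem.Int.toStr n ++ ". Local Patterns: "
          ++ pvGetD r "name" "Unknown") :: pvAllLines (n + 1) [] lt by rfl, join_cons']
      simp only [form_source_list_py_go, ih (n + 1)]
      by_cases hE : pvAllLines (n + 1) [] lt = []
      · simp [hE, join_nil']
      · have hne := (not_iff_not.mpr (join_allLines_eq_empty_iff [] lt (n + 1))).mpr hE
        simp [hE, hne]
  | cons r dt ih =>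
    rw [show pvAllLines n (r :: dt) locs = (PySem.Int.toStr n ++ ". "
        ++ pvGetD r "source" "Document Store" ++ ": "
        ++ pvGetD r "title" (pvGetD r "name" "Unknown")) :: pvAllLines (n + 1) dt locs by rfl,
      join_cons']
    simp only [form_source_list_py_go, ih (n + 1)]
    by_cases hE : pvAllLines (n + 1) dt locs = []
    · simp [hE, join_nil']
    · have hne := (not_iff_not.mpr (join_allLines_eq_empty_iff dt locs (n + 1))).mpr hE
      simp [hE, hne]

-- document part of pvAllLines followed by local part
def pvDocLines (n : Int) : List (List (String × String)) → List String
  | [] => []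
  | r :: t => (PySem.Int.toStr n ++ ". " ++ pvGetD r "source" "Document Store" ++ ": "
      ++ pvGetD r "title" (pvGetD r "name" "Unknown")) :: pvDocLines (n + 1) t

theorem allLines_append (docs locs : List (List (String × String))) (n : Int) :
    pvAllLines n docs locs = pvDocLines n docs ++ pvLocLines (n + docs.length) locs := by
  induction docs generalizing n with
  | nil => simp [pvAllLines, pvDocLines]
  | cons r dt ih =>
    simp only [pvAllLines, pvDocLines, ih (n + 1), List.cons_append, List.length_cons]
    have harg : (n + 1) + (dt.length : Int) = n + ((dt.length + 1 : Nat) : Int) := by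
      push_cast; ring
    rw [harg]

-- merging the string literals of A's local-pattern line
theorem lp_line (a g : String) :
    a ++ ". " ++ "Local Patterns" ++ ": " ++ g = a ++ ". Local Patterns: " ++ g := by
  have h : (". " : String) ++ "Local Patterns" ++ ": " = ". Local Patterns: " := by decide
  calc a ++ ". " ++ "Local Patterns" ++ ": " ++ g
      = a ++ (". " ++ "Local Patterns" ++ ": ") ++ g := by simp [String.append_assoc]
    _ = a ++ ". Local Patterns: " ++ g := by rw [h]

-- A's first loop produces the document lines
theorem mapA_doc (docs : List (List (String × String))) (s : Int) :
    (PySem.List.enumerate docs s).map (fun p =>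
        PySem.Int.toStr (p.1 + 1) ++ ". " ++ pvGetD p.2 "source" "Document Store" ++ ": "
        ++ pvGetD p.2 "title" (pvGetD p.2 "name" "Unknown")) = pvDocLines (s + 1) docs := by
  induction docs generalizing s with
  | nil => simp [PySem.List.enumerate_nil, pvDocLines]
  | cons r dt ih => simp [PySem.List.enumerate_cons, pvDocLines, ih (s + 1)]

-- A's second loop produces the local lines (offset m added inside the formula)
theorem mapA_loc (locs : List (List (String × String))) (s m : Int) :
    (PySem.List.enumerate locs s).map (fun p =>
        PySem.Int.toStr (m + p.1 + 1) ++ ". " ++ "Local Patterns" ++ ": "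
        ++ pvGetD p.2 "name" "Unknown") = pvLocLines (m + s + 1) locs := by
  induction locs generalizing s with
  | nil => simp [PySem.List.enumerate_nil, pvLocLines]
  | cons r lt ih =>
    simp only [PySem.List.enumerate_cons, List.map_cons, pvLocLines, ih (s + 1)]
    refine List.cons_eq_cons.mpr ⟨lp_line _ _, ?_⟩
    congr 1
    omega

-- ===== VERDICT =====
theorem form_source_list_py_spec : Claim_equal_form_source_list_py := by
  intro d l _
  unfold Spec_form_source_list_py form_source_list_py form_source_list_py_alt
  rw [go_eq_join]
  by_cases h : d.isEmpty && l.isEmpty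
  · rcases List.isEmpty_iff.mp (Bool.and_elim_left h) with rfl
    rcases List.isEmpty_iff.mp (Bool.and_elim_right h) with rfl
    decide
  · simp only [h, Bool.false_eq_true, if_false]
    rw [mapA_doc d 0, mapA_loc l 0 (d.length : Int), allLines_append]
    congr 1
    norm_num
    congr 1
    omega
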